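-- pv_equiv track=rewrite | github.com/netor27/codefights-arcade-solutions | python/arcade-theCore/11_SpringOfIntegration/091_Combs.py | combs
-- ===== SOURCE A (Python) =====
-- def combs(comb1, comb2):
--     n1, n2 = len(comb1), len(comb2)
--     res = n1 + n2
--     m1, m2 = mask(comb1), mask(comb2)
--
--     for i in range(n1 + 1):
--         if (m2 << i) & m1 == 0:
--             temp = max(n2 + i, n1)
--             if temp < res:
--                 res = temp
--
--     for i in range(n2 + 1):
--         if (m1 << i) & m2 == 0:
--             temp = max(n1 + i, n2)
--             if temp < res:
--                 res = temp
--
--     return res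
--
-- def mask(s):
--     r = 0
--     for c in s:
--         digit = 0
--         if c == '*':
--             digit = 1
--         r = (r << 1) + digit
--     return r
-- ===== SOURCE B (Python) =====
-- def combs(comb1, comb2):
--     n1, n2 = len(comb1), len(comb2)
--     stars1 = {n2 + j for j, c in enumerate(comb1) if c == '*'}
--     stars2 = [k for k, c in enumerate(comb2) if c == '*']
--     best = n1 + n2
--     for t in range(n1 + n2 + 1):
--         if all(t + k not in stars1 for k in stars2):
--             best = min(best, max(n1 + n2, t + n2) - min(n2, t))
--     return best
-- ===== Notes on version B (the rewrite author's own statement) =====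
-- stated objective: alternative
-- what changed: Replaced the two big-integer bitmask-shift loops with a single loop over all relative placements that tests collisions via a precomputed set of star positions and computes the merged length by a direct interval formula.
import Mathlib
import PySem

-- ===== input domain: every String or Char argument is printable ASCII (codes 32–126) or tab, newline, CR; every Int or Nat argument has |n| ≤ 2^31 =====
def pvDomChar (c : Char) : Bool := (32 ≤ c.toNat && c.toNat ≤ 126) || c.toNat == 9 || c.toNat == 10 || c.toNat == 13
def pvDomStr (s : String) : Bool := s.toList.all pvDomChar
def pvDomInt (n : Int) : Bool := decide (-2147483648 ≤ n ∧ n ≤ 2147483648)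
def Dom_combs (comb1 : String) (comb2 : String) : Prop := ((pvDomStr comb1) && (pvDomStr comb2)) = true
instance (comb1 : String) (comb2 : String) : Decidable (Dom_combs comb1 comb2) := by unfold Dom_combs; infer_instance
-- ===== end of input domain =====

-- B replaces A's two big-integer bitmask-shift loops by one loop over all relative
-- placements, testing collisions against a precomputed set of star positions
-- (objective: alternative algorithm of similar cost; no speed claim).

-- ===== PORT A =====
def pvMask (s : String) : Nat :=
  s.toList.foldl (fun r c => 2 * r + (if c = '*' then 1 else 0)) 0

def combs (comb1 : String) (comb2 : String) : Int :=
  let n1 := comb1.toList.length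
  let n2 := comb2.toList.length
  let m1 := pvMask comb1
  let m2 := pvMask comb2
  let res1 := (List.range (n1 + 1)).foldl
    (fun res i =>
      if (m2 <<< i) &&& m1 = 0 then
        let temp := max (n2 + i) n1
        if temp < res then temp else res
      else res) (n1 + n2)
  let res2 := (List.range (n2 + 1)).foldl
    (fun res i =>
      if (m1 <<< i) &&& m2 = 0 then
        let temp := max (n1 + i) n2
        if temp < res then temp else res
      else res) res1
  (res2 : Int)

-- ===== PORT B =====
def combs_alt (comb1 : String) (comb2 : String) : Int :=
  let n1 := comb1.toList.length
  let n2 := comb2.toList.length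
  let stars1 : PySem.Set Nat :=
    PySem.Set.ofList (comb1.toList.zipIdx.filterMap (fun p => if p.1 = '*' then some (n2 + p.2) else none))
  let stars2 : List Nat :=
    comb2.toList.zipIdx.filterMap (fun p => if p.1 = '*' then some p.2 else none)
  let best := (List.range (n1 + n2 + 1)).foldl
    (fun best t =>
      if stars2.all (fun k => !(PySem.Set.contains stars1 (t + k))) then
        min best (max (n1 + n2) (t + n2) - min n2 t)
      else best) (n1 + n2)
  (best : Int)

-- ===== PRECONDITION & SPEC =====
def Spec_combs (comb1 : String) (comb2 : String) (out : Int) : Prop := out = combs_alt comb1 comb2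
instance (comb1 : String) (comb2 : String) (out : Int) : Decidable (Spec_combs comb1 comb2 out) := by unfold Spec_combs; infer_instance

-- ===== CLAIM (what is proved, stated in full; the proofs are below) =====
def Claim_equal_combs : Prop := ∀ (comb1 : String) (comb2 : String), Dom_combs comb1 comb2 → Spec_combs comb1 comb2 (combs comb1 comb2)

-- ===== LEMMAS AND PROOFS =====

-- mask, over the character list (pvMask s = pvMaskL s.toList by definition)
def pvMaskL (l : List Char) : Nat :=
  l.foldl (fun r c => 2 * r + (if c = '*' then 1 else 0)) 0

-- "placing comb2 so that its cell k sits over comb1's cell j iff t + k = l2.length + j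
--  produces no tooth collision"
def pvFreeB (l1 l2 : List Char) (t : Nat) : Bool :=
  decide (∀ j, j < l1.length → ∀ k, k < l2.length →
    l1.getD j ' ' = '*' → l2.getD k ' ' = '*' → t + k ≠ l2.length + j)

-- candidate merged length at placement t (sentinel l1.length + l2.length when blocked)
def pvG (l1 l2 : List Char) (t : Nat) : Nat :=
  if pvFreeB l1 l2 t then max (l1.length + l2.length) (t + l2.length) - min l2.length t
  else l1.length + l2.length

-- ---- generic min-fold toolbox (values in Nat) ----

theorem pvR_le_base {β : Type} (g : β → Nat) (b : Nat) (l : List β) :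
    l.foldr (fun x r => min (g x) r) b ≤ b := by
  induction l with
  | nil => simp
  | cons x l ih => simp only [List.foldr]; omega

theorem pvR_min_base {β : Type} (g : β → Nat) (b c : Nat) (l : List β) :
    l.foldr (fun x r => min (g x) r) (min b c)
      = min c (l.foldr (fun x r => min (g x) r) b) := by
  induction l with
  | nil => simp only [List.foldr]; omega
  | cons x l ih => simp only [List.foldr, ih]; omega

theorem pvR_sentinel {β : Type} (g : β → Nat) (b T : Nat) (l : List β) (hb : b ≤ T) :
    l.foldr (fun x r => min (g x) r) b
      = min (l.foldr (fun x r => min (g x) r) T) b := by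
  induction l with
  | nil => simp only [List.foldr]; omega
  | cons x l ih => simp only [List.foldr, ih]; omega

theorem pvR_mem_le {β : Type} (g : β → Nat) (b : Nat) (l : List β) (x : β) (hx : x ∈ l) :
    l.foldr (fun x r => min (g x) r) b ≤ g x := by
  induction l with
  | nil => cases hx
  | cons y l ih =>
    rcases List.mem_cons.mp hx with h | h
    · subst h; simp only [List.foldr]; omega
    · have := ih h; simp only [List.foldr]; omega

theorem pvR_congr {β : Type} (g g' : β → Nat) (b : Nat) (l : List β)
    (h : ∀ x ∈ l, g x = g' x) :
    l.foldr (fun x r => min (g x) r) b = l.foldr (fun x r => min (g' x) r) b := by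
  induction l with
  | nil => rfl
  | cons x l ih =>
    simp only [List.foldr, h x (List.mem_cons_self ..),
      ih (fun y hy => h y (List.mem_cons_of_mem _ hy))]

theorem pvFoldl_flip_min {β : Type} (g : β → Nat) :
    ∀ (l : List β) (b : Nat),
      l.foldl (fun r x => min (g x) r) b = l.foldr (fun x r => min (g x) r) b := by
  intro l
  induction l with
  | nil => intro b; rfl
  | cons x l ih =>
    intro b
    simp only [List.foldl, List.foldr, ih]
    rw [Nat.min_comm (g x) b, pvR_min_base]

theorem pvR_reverse {β : Type} (g : β → Nat) (b : Nat) (l : List β) :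
    l.reverse.foldr (fun x r => min (g x) r) b = l.foldr (fun x r => min (g x) r) b := by
  rw [List.foldr_reverse]
  exact pvFoldl_flip_min g l b

theorem pvFoldl_ifmin {β : Type} (P : β → Prop) [DecidablePred P] (c : β → Nat) (T : Nat) :
    ∀ (l : List β) (a : Nat), a ≤ T →
      l.foldl (fun r x => if P x then min r (c x) else r) a
        = min a (l.foldr (fun x r => min (if P x then c x else T) r) T) := by
  intro l
  induction l with
  | nil => intro a ha; simp only [List.foldl, List.foldr]; omega
  | cons x l ih =>
    intro a ha
    by_cases h : P x
    · simp only [List.foldl, List.foldr, if_pos h]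
      rw [ih (min a (c x)) (by omega)]
      omega
    · simp only [List.foldl, List.foldr, if_neg h]
      rw [ih a ha]
      have := pvR_le_base (fun x => if P x then c x else T) T l
      omega

theorem pvStep_eq {β : Type} (P : β → Prop) [DecidablePred P] (c : β → Nat) :
    (fun (r : Nat) (x : β) => if P x then (let temp := c x; if temp < r then temp else r) else r)
      = fun (r : Nat) (x : β) => if P x then min r (c x) else r := by
  funext r x
  by_cases h : P x
  · simp only [if_pos h]
    rw [Nat.min_def]
    split_ifs <;> omega
  · simp only [if_neg h]

-- ---- bitmask characterisation ----

theorem pvMaskL_testBit (l : List Char) (p : Nat) :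
    (pvMaskL l).testBit p = (l.reverse.getD p ' ' == '*') := by
  induction l using List.reverseRecOn generalizing p with
  | nil => simp [pvMaskL, Nat.zero_testBit, List.getD]
  | append_singleton l c ih =>
    have hfold : pvMaskL (l ++ [c]) = 2 * pvMaskL l + (if c = '*' then 1 else 0) := by
      simp [pvMaskL, List.foldl_append]
    have hrev : (l ++ [c]).reverse = c :: l.reverse := by simp
    rw [hfold, hrev]
    cases p with
    | zero =>
      rw [Nat.testBit_zero]
      simp only [List.getD_cons_zero]
      by_cases h : c = '*' <;> simp [h]
    | succ p =>
      rw [Nat.testBit_succ]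
      have h2 : (2 * pvMaskL l + (if c = '*' then 1 else 0)) / 2 = pvMaskL l := by
        by_cases h : c = '*' <;> simp [h] <;> omega
      rw [h2, ih]
      simp

theorem pvLand_eq_zero_iff (a b : Nat) :
    a &&& b = 0 ↔ ∀ p, ¬(a.testBit p = true ∧ b.testBit p = true) := by
  constructor
  · intro h p hp
    have := Nat.testBit_land a b p
    rw [h, Nat.zero_testBit, hp.1, hp.2] at this
    simp at this
  · intro h
    apply Nat.eq_of_testBit_eq
    intro p
    rw [Nat.testBit_land, Nat.zero_testBit]
    specialize h p
    cases ha : a.testBit p <;> cases hb : b.testBit p <;> simp_all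

theorem pvRevStar (l : List Char) (p : Nat) :
    l.reverse.getD p ' ' = '*' ↔
      ∃ j, j < l.length ∧ l.getD j ' ' = '*' ∧ p + j + 1 = l.length := by
  by_cases hp : p < l.length
  · have hget : l.reverse.getD p ' ' = l.getD (l.length - 1 - p) ' ' := by
      rw [List.getD_eq_getElem _ _ (by simpa using hp),
        List.getD_eq_getElem _ _ (by omega)]
      exact List.getElem_reverse (by simpa using hp)
    rw [hget]
    constructor
    · intro h
      exact ⟨l.length - 1 - p, by omega, h, by omega⟩
    · rintro ⟨j, hj, hstar, hpj⟩
      have : l.length - 1 - p = j := by omega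
      rwa [this]
  · rw [List.getD_eq_default _ _ (by simpa using (by omega : l.length ≤ p))]
    constructor
    · intro h; exact absurd h (by decide)
    · rintro ⟨j, hj, _, hpj⟩; omega

-- A's first-loop test at shift i is B's collision-freedom test at placement l1.length - i
theorem pvCondA1 (l1 l2 : List Char) (i : Nat) (hi : i ≤ l1.length) :
    ((pvMaskL l2 <<< i) &&& pvMaskL l1 = 0) ↔ pvFreeB l1 l2 (l1.length - i) = true := by
  rw [pvLand_eq_zero_iff]
  simp only [pvFreeB, decide_eq_true_eq]
  constructor
  · intro h j hj k hk s1 s2 heq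
    apply h (l1.length - 1 - j)
    refine ⟨?_, ?_⟩
    · rw [Nat.testBit_shiftLeft, Bool.and_eq_true]
      refine ⟨decide_eq_true (by omega), ?_⟩
      rw [pvMaskL_testBit, beq_iff_eq, pvRevStar]
      exact ⟨k, hk, s2, by omega⟩
    · rw [pvMaskL_testBit, beq_iff_eq, pvRevStar]
      exact ⟨j, hj, s1, by omega⟩
  · rintro h p ⟨hp2, hp1⟩
    rw [pvMaskL_testBit, beq_iff_eq, pvRevStar] at hp1
    rw [Nat.testBit_shiftLeft, Bool.and_eq_true] at hp2
    obtain ⟨hdec, htb⟩ := hp2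
    have hip : i ≤ p := by simpa using hdec
    rw [pvMaskL_testBit, beq_iff_eq, pvRevStar] at htb
    obtain ⟨j, hj, s1, hpj⟩ := hp1
    obtain ⟨k, hk, s2, hpk⟩ := htb
    exact h j hj k hk s1 s2 (by omega)

-- A's second-loop test at shift i is B's collision-freedom test at placement l1.length + i
theorem pvCondA2 (l1 l2 : List Char) (i : Nat) :
    ((pvMaskL l1 <<< i) &&& pvMaskL l2 = 0) ↔ pvFreeB l1 l2 (l1.length + i) = true := by
  rw [pvLand_eq_zero_iff]
  simp only [pvFreeB, decide_eq_true_eq]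
  constructor
  · intro h j hj k hk s1 s2 heq
    apply h (l2.length - 1 - k)
    refine ⟨?_, ?_⟩
    · rw [Nat.testBit_shiftLeft, Bool.and_eq_true]
      refine ⟨decide_eq_true (by omega), ?_⟩
      rw [pvMaskL_testBit, beq_iff_eq, pvRevStar]
      exact ⟨j, hj, s1, by omega⟩
    · rw [pvMaskL_testBit, beq_iff_eq, pvRevStar]
      exact ⟨k, hk, s2, by omega⟩
  · rintro h p ⟨hp1, hp2⟩
    rw [pvMaskL_testBit, beq_iff_eq, pvRevStar] at hp2
    rw [Nat.testBit_shiftLeft, Bool.and_eq_true] at hp1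
    obtain ⟨hdec, htb⟩ := hp1
    have hip : i ≤ p := by simpa using hdec
    rw [pvMaskL_testBit, beq_iff_eq, pvRevStar] at htb
    obtain ⟨k, hk, s2, hpk⟩ := hp2
    obtain ⟨j, hj, s1, hpj⟩ := htb
    exact h j hj k hk s1 s2 (by omega)

-- B's star-set test is the same collision-freedom test
theorem pvCondB (l1 l2 : List Char) (t : Nat) :
    ((l2.zipIdx.filterMap (fun p => if p.1 = '*' then some p.2 else none)).all
      (fun k => !(PySem.Set.contains
        (PySem.Set.ofList (l1.zipIdx.filterMap (fun p => if p.1 = '*' then some (l2.length + p.2) else none)))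
        (t + k))))
    = pvFreeB l1 l2 t := by
  rw [Bool.eq_iff_iff]
  simp only [List.all_eq_true, List.mem_filterMap, Bool.not_eq_true',
    ← Bool.not_eq_true, PySem.Set.contains_iff,
    PySem.Set.mem_ofList, pvFreeB, decide_eq_true_eq]
  constructor
  · intro h j hj k hk s1 s2 heq
    have hj2 : l1[j] = '*' := by rw [← List.getD_eq_getElem l1 ' ' hj]; exact s1
    have hk2 : l2[k] = '*' := by rw [← List.getD_eq_getElem l2 ' ' hk]; exact s2
    refine h k ⟨('*', k), ?_, by simp⟩ ⟨('*', j), ?_, by simp [heq]⟩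
    · exact List.mk_mem_zipIdx_iff_getElem?.mpr (by rw [List.getElem?_eq_getElem hk, hk2])
    · exact List.mk_mem_zipIdx_iff_getElem?.mpr (by rw [List.getElem?_eq_getElem hj, hj2])
  · rintro h k ⟨⟨c, k'⟩, hmem, hsome⟩ ⟨⟨c', j⟩, hmem', hsome'⟩
    have hk' := List.mk_mem_zipIdx_iff_getElem?.mp hmem
    have hj' := List.mk_mem_zipIdx_iff_getElem?.mp hmem'
    by_cases hc : c = '*'
    · by_cases hc' : c' = '*'
      · subst hc; subst hc'
        rw [if_pos rfl] at hsome hsome'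
        injection hsome with hkk
        injection hsome' with hjj
        have hkl : k' < l2.length := (List.getElem?_eq_some_iff.mp hk').1
        have hjl : j < l1.length := (List.getElem?_eq_some_iff.mp hj').1
        refine h j hjl k' hkl ?_ ?_ (by omega)
        · rw [List.getD_eq_getElem l1 ' ' hjl, (List.getElem?_eq_some_iff.mp hj').2]
        · rw [List.getD_eq_getElem l2 ' ' hkl, (List.getElem?_eq_some_iff.mp hk').2]
      · simp [hc'] at hsome'
    · simp [hc] at hsome

-- reversal of range under (n - ·)
theorem pvMap_sub_range (n : Nat) :
    (List.range (n + 1)).map (fun i => n - i) = (List.range (n + 1)).reverse := by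
  apply List.ext_getElem (by simp)
  intro k h1 h2
  simp only [List.getElem_map, List.getElem_range,
    List.getElem_reverse, List.length_range]
  simp only [List.length_map, List.length_range] at h1
  omega

-- the main Nat-level identity between A's two folds and B's single fold
theorem pvMain (l1 l2 : List Char) :
    (List.range (l2.length + 1)).foldl
      (fun res i =>
        if (pvMaskL l1 <<< i) &&& pvMaskL l2 = 0 then
          let temp := max (l1.length + i) l2.length
          if temp < res then temp else res
        else res)
      ((List.range (l1.length + 1)).foldl
        (fun res i =>
          if (pvMaskL l2 <<< i) &&& pvMaskL l1 = 0 then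
            let temp := max (l2.length + i) l1.length
            if temp < res then temp else res
          else res)
        (l1.length + l2.length))
    = (List.range (l1.length + l2.length + 1)).foldl
        (fun best t =>
          if (l2.zipIdx.filterMap (fun p => if p.1 = '*' then some p.2 else none)).all
              (fun k => !(PySem.Set.contains
                (PySem.Set.ofList (l1.zipIdx.filterMap (fun p => if p.1 = '*' then some (l2.length + p.2) else none)))
                (t + k)))
          then min best (max (l1.length + l2.length) (t + l2.length) - min l2.length t)
          else best)
        (l1.length + l2.length) := by
  -- rewrite both A-steps to if-min shape
  rw [pvStep_eq (fun i => (pvMaskL l2 <<< i) &&& pvMaskL l1 = 0)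
        (fun i => max (l2.length + i) l1.length),
      pvStep_eq (fun i => (pvMaskL l1 <<< i) &&& pvMaskL l2 = 0)
        (fun i => max (l1.length + i) l2.length)]
  -- pointwise identification of the loop-body candidates with pvG
  have hc1 : ∀ i ∈ List.range (l1.length + 1),
      (if (pvMaskL l2 <<< i) &&& pvMaskL l1 = 0 then max (l2.length + i) l1.length
       else l1.length + l2.length) = pvG l1 l2 (l1.length - i) := by
    intro i hi
    have hiN : i ≤ l1.length := by have := List.mem_range.mp hi; omega
    unfold pvG
    exact if_congr (pvCondA1 l1 l2 i hiN) (by omega) rfl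
  have hc2 : ∀ i ∈ List.range (l2.length + 1),
      (if (pvMaskL l1 <<< i) &&& pvMaskL l2 = 0 then max (l1.length + i) l2.length
       else l1.length + l2.length) = pvG l1 l2 (l1.length + i) := by
    intro i _
    unfold pvG
    exact if_congr (pvCondA2 l1 l2 i) (by omega) rfl
  have hc3 : ∀ t ∈ List.range (l1.length + l2.length + 1),
      (if (l2.zipIdx.filterMap (fun p => if p.1 = '*' then some p.2 else none)).all
            (fun k => !(PySem.Set.contains
              (PySem.Set.ofList (l1.zipIdx.filterMap (fun p => if p.1 = '*' then some (l2.length + p.2) else none)))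
              (t + k))) = true
       then max (l1.length + l2.length) (t + l2.length) - min l2.length t
       else l1.length + l2.length) = pvG l1 l2 t := by
    intro t _
    unfold pvG
    exact if_congr (by rw [pvCondB]) rfl rfl
  have hW := pvR_le_base (fun i => pvG l1 l2 (l1.length + 1 + i)) (l1.length + l2.length)
    (List.range l2.length)
  -- loop 1 of A
  rw [pvFoldl_ifmin (fun i => (pvMaskL l2 <<< i) &&& pvMaskL l1 = 0)
    (fun i => max (l2.length + i) l1.length) (l1.length + l2.length)
    (List.range (l1.length + 1)) (l1.length + l2.length) (le_refl _)]
  rw [pvR_congr _ _ _ _ hc1]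
  have e1 : (List.range (l1.length + 1)).foldr (fun i r => min (pvG l1 l2 (l1.length - i)) r)
        (l1.length + l2.length)
      = (List.range (l1.length + 1)).foldr (fun t r => min (pvG l1 l2 t) r)
        (l1.length + l2.length) := by
    rw [← List.foldr_map (f := fun i => l1.length - i) (g := fun t r => min (pvG l1 l2 t) r),
      pvMap_sub_range, pvR_reverse]
  rw [e1]
  -- loop 2 of A
  rw [pvFoldl_ifmin (fun i => (pvMaskL l1 <<< i) &&& pvMaskL l2 = 0)
    (fun i => max (l1.length + i) l2.length) (l1.length + l2.length)
    (List.range (l2.length + 1)) _ (by omega)]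
  rw [pvR_congr _ _ _ _ hc2]
  have e2 : (List.range (l2.length + 1)).foldr (fun i r => min (pvG l1 l2 (l1.length + i)) r)
        (l1.length + l2.length)
      = min (pvG l1 l2 l1.length)
          ((List.range l2.length).foldr (fun i r => min (pvG l1 l2 (l1.length + 1 + i)) r)
            (l1.length + l2.length)) := by
    rw [List.range_succ_eq_map, List.foldr_cons, List.foldr_map, Nat.add_zero]
    congr 1
    apply pvR_congr
    intro i _
    congr 1
    omega
  rw [e2]
  -- the single loop of B
  rw [pvFoldl_ifmin
    (fun t => ((l2.zipIdx.filterMap (fun p => if p.1 = '*' then some p.2 else none)).all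
      (fun k => !(PySem.Set.contains
        (PySem.Set.ofList (l1.zipIdx.filterMap (fun p => if p.1 = '*' then some (l2.length + p.2) else none)))
        (t + k)))) = true)
    (fun t => max (l1.length + l2.length) (t + l2.length) - min l2.length t)
    (l1.length + l2.length) (List.range (l1.length + l2.length + 1))
    (l1.length + l2.length) (le_refl _)]
  rw [pvR_congr _ _ _ _ hc3]
  have e3 : (List.range (l1.length + l2.length + 1)).foldr (fun t r => min (pvG l1 l2 t) r)
        (l1.length + l2.length)
      = min ((List.range (l1.length + 1)).foldr (fun t r => min (pvG l1 l2 t) r)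
            (l1.length + l2.length))
          ((List.range l2.length).foldr (fun i r => min (pvG l1 l2 (l1.length + 1 + i)) r)
            (l1.length + l2.length)) := by
    have hsplit : List.range (l1.length + l2.length + 1)
        = List.range (l1.length + 1) ++ (List.range l2.length).map (fun x => l1.length + 1 + x) := by
      have h : l1.length + l2.length + 1 = (l1.length + 1) + l2.length := by omega
      rw [h, List.range_add]
    rw [hsplit, List.foldr_append, List.foldr_map]
    exact pvR_sentinel (fun t => pvG l1 l2 t) _ _ _ hW
  rw [e3]
  -- combine: the duplicated placement l1.length is absorbed by idempotence of min
  have hXg : (List.range (l1.length + 1)).foldr (fun t r => min (pvG l1 l2 t) r)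
        (l1.length + l2.length) ≤ pvG l1 l2 l1.length :=
    pvR_mem_le (fun t => pvG l1 l2 t) _ _ l1.length (List.mem_range.mpr (by omega))
  omega

-- ===== VERDICT (by name: the statement is the Claim_ definition above) =====
theorem combs_spec : Claim_equal_combs := by
  intro comb1 comb2 _
  unfold Spec_combs
  exact congrArg (fun n : Nat => (n : Int)) (pvMain comb1.toList comb2.toList)
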